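-- pv_equiv track=rewrite | github.com/JostBrand/jsonshiatsu | jsonshiatsu/core/transformer.py | fix_multiline_strings
-- ===== SOURCE A (Python) =====
-- def fix_multiline_strings(text: str) -> str:
--     """
--     Fix multiline string literals by properly escaping or joining them.
--
--     Handles cases where strings are split across lines without proper escaping.
--     """
--     lines = text.split("\n")
--     fixed_lines = []
--     i = 0
--
--     while i < len(lines):
--         line = lines[i]
--
--         # Check if line has an unclosed string (odd number of unescaped quotes)
--         quote_count = 0
--         escaped = False
--         for char in line:
--             if char == "\\" and not escaped:
--                 escaped = True
--                 continue
--             if char == '"' and not escaped: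
--                 quote_count += 1
--             escaped = False
--
--         # If odd number of quotes, string continues to next line
--         if quote_count % 2 == 1 and i < len(lines) - 1:
--             # Look for the closing quote in subsequent lines
--             combined_line = line
--             j = i + 1
--             while j < len(lines):
--                 next_line = lines[j]
--                 combined_line += "\\n" + next_line.strip()
--
--                 # Count quotes in this line
--                 next_quote_count = 0
--                 escaped = False
--                 for char in next_line:
--                     if char == "\\" and not escaped:
--                         escaped = True
--                         continue
--                     if char == '"' and not escaped:
--                         next_quote_count += 1
--                     escaped = False
--
--                 # If we found a closing quote, combine and break
--                 if next_quote_count % 2 == 1: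
--                     fixed_lines.append(combined_line)
--                     i = j + 1
--                     break
--                 j += 1
--
--             # If we didn't find a closing quote, just use the line as-is
--             if j >= len(lines):
--                 fixed_lines.append(line + '"')  # Add closing quote
--                 i += 1
--         else:
--             fixed_lines.append(line)
--             i += 1
--
--     return "\n".join(fixed_lines)
-- ===== SOURCE B (Python) =====
-- def _odd_quotes(line: str) -> bool:
--     count = 0
--     escaped = False
--     for char in line:
--         if char == "\\" and not escaped:
--             escaped = True
--             continue
--         if char == '"' and not escaped:
--             count += 1
--         escaped = False
--     return count % 2 == 1
--
--
-- def fix_multiline_strings(text: str) -> str: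
--     out = []
--     group = None  # (opening line, subsequent raw lines of the open group)
--     for line in text.split("\n"):
--         odd = _odd_quotes(line)
--         if group is None:
--             if odd:
--                 group = (line, [])
--             else:
--                 out.append(line)
--         else:
--             first, rest = group
--             rest.append(line)
--             if odd:
--                 out.append(first + "".join("\\n" + l.strip() for l in rest))
--                 group = None
--     if group is not None:
--         first, rest = group
--         if rest:
--             out.append(first + '"')
--             out.extend(rest)
--         else:
--             out.append(first)
--     return "\n".join(out)
-- ===== Notes on version B (the rewrite author's own statement) =====
-- stated objective: simpler
-- what changed: Replaced A's index-jumping outer while loop with a nested look-ahead rescan by a single forward pass that carries an open-group accumulator (opening line plus raw continuation lines) and closes or flushes it, so every line is examined exactly once in order.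
import Mathlib
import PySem

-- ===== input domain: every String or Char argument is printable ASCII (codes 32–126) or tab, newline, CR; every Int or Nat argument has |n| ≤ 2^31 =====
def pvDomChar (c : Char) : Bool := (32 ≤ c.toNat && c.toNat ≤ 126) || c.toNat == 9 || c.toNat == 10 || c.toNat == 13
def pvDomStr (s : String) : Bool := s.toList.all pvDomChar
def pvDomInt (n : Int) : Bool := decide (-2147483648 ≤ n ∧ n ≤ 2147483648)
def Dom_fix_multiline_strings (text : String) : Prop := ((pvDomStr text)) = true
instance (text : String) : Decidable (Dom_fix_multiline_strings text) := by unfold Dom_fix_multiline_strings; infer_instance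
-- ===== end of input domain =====

-- B replaces A's index-jumping loop with nested look-ahead by a single forward pass
-- carrying an open-group accumulator (objective: simpler; same asymptotic cost).

-- ===== PORT A =====
-- the escape-aware unescaped-quote scanner (A's inline counting loop, appearing twice in A;
-- B's Python has it as the helper _odd_quotes — same code, shared here)
def pvQuoteStep (st : Nat × Bool) (c : Char) : Nat × Bool :=
  if c = '\\' && !st.2 then (st.1, true)
  else (if c = '"' && !st.2 then st.1 + 1 else st.1, false)

def pvOddQuotes (line : List Char) : Bool :=
  (line.foldl pvQuoteStep (0, false)).1 % 2 == 1

-- A's inner while-j loop: accumulate combined_line, stop at the first odd-parity line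
def fixA_inner (combined : List Char) (rest : List (List Char)) :
    Option (List Char × List (List Char)) :=
  match rest with
  | [] => none
  | next :: rs =>
    let combined' := combined ++ ['\\', 'n'] ++ PySem.Chars.strip next
    if pvOddQuotes next then some (combined', rs) else fixA_inner combined' rs

-- used by fixA_loop's termination
theorem fixA_inner_length : ∀ (rest : List (List Char)) (c c' : List Char)
    (rs : List (List Char)), fixA_inner c rest = some (c', rs) → rs.length < rest.length := by
  intro rest
  induction rest with
  | nil => intro c c' rs h; simp [fixA_inner] at h
  | cons next rs' ih =>
    intro c c' rs h
    simp only [fixA_inner] at h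
    by_cases hodd : pvOddQuotes next
    · simp [hodd] at h; simp [h.2]
    · simp [hodd] at h
      exact Nat.lt_trans (ih _ _ _ h) (Nat.lt_succ_self _)

-- A's outer while-i loop over the list of lines
def fixA_loop (lines : List (List Char)) : List (List Char) :=
  match lines with
  | [] => []
  | line :: rest =>
    if pvOddQuotes line && !rest.isEmpty then
      match h : fixA_inner line rest with
      | some (c, rs) => c :: fixA_loop rs
      | none => (line ++ ['"']) :: fixA_loop rest
    else line :: fixA_loop rest
termination_by lines.length
decreasing_by
  · exact Nat.lt_trans (fixA_inner_length _ _ _ _ h) (Nat.lt_succ_self _)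
  · exact Nat.lt_succ_self _
  · exact Nat.lt_succ_self _

def fix_multiline_strings (text : String) : String :=
  String.ofList (PySem.Chars.join ['\n'] (fixA_loop (PySem.Chars.splitOn text.toList ['\n'])))

-- ===== PORT B =====
-- close an open group: first + "".join("\\n" + l.strip() for l in rest)
def pvStripJoin (first : List Char) (rest : List (List Char)) : List Char :=
  first ++ (rest.map (fun l => '\\' :: 'n' :: PySem.Chars.strip l)).flatten

-- B's single forward pass with the open-group accumulator
def fixB_go (group : Option (List Char × List (List Char))) (lines : List (List Char)) :
    List (List Char) :=
  match lines with
  | [] =>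
    match group with
    | none => []
    | some (first, rest) => if rest.isEmpty then [first] else (first ++ ['"']) :: rest
  | line :: ls =>
    match group with
    | none =>
      if pvOddQuotes line then fixB_go (some (line, [])) ls
      else line :: fixB_go none ls
    | some (first, rest) =>
      if pvOddQuotes line then pvStripJoin first (rest ++ [line]) :: fixB_go none ls
      else fixB_go (some (first, rest ++ [line])) ls

def fix_multiline_strings_alt (text : String) : String :=
  String.ofList (PySem.Chars.join ['\n'] (fixB_go none (PySem.Chars.splitOn text.toList ['\n'])))

-- ===== PRECONDITION & SPEC =====
def Spec_fix_multiline_strings (text : String) (out : String) : Prop := out = fix_multiline_strings_alt text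
instance (text : String) (out : String) : Decidable (Spec_fix_multiline_strings text out) := by unfold Spec_fix_multiline_strings; infer_instance

-- ===== CLAIM (what is proved, stated in full; the proofs are below) =====
def Claim_equal_fix_multiline_strings : Prop := ∀ (text : String), Dom_fix_multiline_strings text → Spec_fix_multiline_strings text (fix_multiline_strings text)

-- ===== LEMMAS AND PROOFS =====

theorem fixA_inner_none : ∀ (rest : List (List Char)) (c : List Char),
    fixA_inner c rest = none → ∀ l ∈ rest, pvOddQuotes l = false := by
  intro rest
  induction rest with
  | nil => intro c _ l hl; simp at hl
  | cons next rs ih =>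
    intro c h l hl
    simp only [fixA_inner] at h
    by_cases hodd : pvOddQuotes next
    · simp [hodd] at h
    · simp [hodd] at h
      rcases List.mem_cons.mp hl with rfl | hmem
      · simpa using hodd
      · exact ih _ h l hmem

theorem fixA_loop_nil : fixA_loop [] = [] := by rw [fixA_loop]

theorem fixA_loop_evens : ∀ (rest : List (List Char)),
    (∀ l ∈ rest, pvOddQuotes l = false) → fixA_loop rest = rest := by
  intro rest
  induction rest with
  | nil => exact fun _ => fixA_loop_nil
  | cons line rs ih =>
    intro h
    rw [fixA_loop]
    have hline : pvOddQuotes line = false := h line (List.mem_cons_self)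
    simp [hline, ih (fun l hl => h l (List.mem_cons_of_mem _ hl))]

theorem pvStripJoin_snoc (first : List Char) (acc : List (List Char)) (line : List Char) :
    pvStripJoin first (acc ++ [line]) =
      pvStripJoin first acc ++ ['\\', 'n'] ++ PySem.Chars.strip line := by
  simp [pvStripJoin]

theorem fixB_inner_rel : ∀ (rest : List (List Char)) (first : List Char)
    (acc : List (List Char)),
    fixB_go (some (first, acc)) rest =
      match fixA_inner (pvStripJoin first acc) rest with
      | some (c, rs) => c :: fixB_go none rs
      | none => if (acc ++ rest).isEmpty then [first] else (first ++ ['"']) :: (acc ++ rest) := by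
  intro rest
  induction rest with
  | nil =>
    intro first acc
    simp [fixB_go, fixA_inner]
  | cons line ls ih =>
    intro first acc
    rw [fixB_go, fixA_inner]
    by_cases hodd : pvOddQuotes line
    · simp only [hodd, if_true]
      rw [pvStripJoin_snoc]
    · simp only [hodd, if_false, Bool.false_eq_true]
      rw [ih first (acc ++ [line]), pvStripJoin_snoc]
      simp

theorem fixAB_eq : ∀ (n : Nat) (lines : List (List Char)), lines.length ≤ n →
    fixA_loop lines = fixB_go none lines := by
  intro n
  induction n with
  | zero =>
    intro lines h
    have : lines = [] := List.eq_nil_of_length_eq_zero (Nat.le_zero.mp h)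
    subst this; simp [fixA_loop_nil, fixB_go]
  | succ n ih =>
    intro lines h
    match lines with
    | [] => simp [fixA_loop_nil, fixB_go]
    | line :: rest =>
      have hrest : rest.length ≤ n := Nat.le_of_succ_le_succ h
      rw [fixA_loop, fixB_go]
      by_cases hodd : pvOddQuotes line
      · match hr : rest with
        | [] =>
          simp [hodd, fixA_loop_nil, fixB_go]
        | r0 :: rs0 =>
          simp only [hodd, List.isEmpty_cons, Bool.not_false, Bool.and_true, if_true]
          have hfirst : pvStripJoin line [] = line := by simp [pvStripJoin]
          have := fixB_inner_rel (r0 :: rs0) line []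
          rw [hfirst] at this
          rw [this]
          match hin : fixA_inner line (r0 :: rs0) with
          | some (c, rs) =>
            simp only
            rw [ih rs (Nat.le_of_lt (Nat.lt_of_lt_of_le (fixA_inner_length _ _ _ _ hin) hrest))]
          | none =>
            have hev := fixA_inner_none _ _ hin
            simp only [List.nil_append, List.isEmpty_cons, Bool.false_eq_true, if_false]
            rw [fixA_loop_evens _ hev]
      · simp only [hodd, Bool.false_and, if_false, Bool.false_eq_true]
        rw [ih rest hrest]

-- ===== VERDICT (by name: the statement is the Claim_ definition above) =====
theorem fix_multiline_strings_spec : Claim_equal_fix_multiline_strings := by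
  intro text _
  unfold Spec_fix_multiline_strings fix_multiline_strings fix_multiline_strings_alt
  rw [fixAB_eq (PySem.Chars.splitOn text.toList ['\n']).length _ (Nat.le_refl _)]
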